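-- pv_equiv track=rewrite | github.com/FoxZ322/Time-Series-Analysis | average_annual_precipitation_preprocessing.py | to_annual_precipitation
-- ===== SOURCE A (Python) =====
-- def to_annual_precipitation(series):
--     res = []
--     current = list(series)
--     for i in range(80):
--         if not(i % 4):
--             res += [sum(current[:366])]
--             current = current[366:]
--         else:
--             res += [sum(current[:365])]
--             current = current[365:]
--
--     return res
-- ===== SOURCE B (Python) =====
-- def to_annual_precipitation(series):
--     res = [0] * 80
--     y = 0
--     rem = 366
--     for x in series:
--         res[y] += x
--         rem -= 1
--         if rem == 0:
--             y += 1
--             if y == 80: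
--                 break
--             rem = 366 if y % 4 == 0 else 365
--     return res
-- ===== Notes on version B (the rewrite author's own statement) =====
-- stated objective: alternative
-- what changed: Replaces 80 rounds of tail-slicing (each re-copying the remaining series) with one element-wise pass that bins values into 80 preallocated accumulators, advancing a year pointer at the precomputed year boundaries and stopping after 80 years.
import Mathlib
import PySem

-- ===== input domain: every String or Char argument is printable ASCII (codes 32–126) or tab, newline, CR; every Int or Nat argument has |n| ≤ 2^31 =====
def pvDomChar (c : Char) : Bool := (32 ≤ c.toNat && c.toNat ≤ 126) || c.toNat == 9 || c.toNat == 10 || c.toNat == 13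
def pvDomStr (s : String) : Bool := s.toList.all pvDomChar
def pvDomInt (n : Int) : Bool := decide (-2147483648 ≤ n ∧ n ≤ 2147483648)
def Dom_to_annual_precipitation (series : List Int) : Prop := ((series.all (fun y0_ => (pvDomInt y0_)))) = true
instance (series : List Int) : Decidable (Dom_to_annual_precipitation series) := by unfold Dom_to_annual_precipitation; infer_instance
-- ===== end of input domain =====

-- B replaces A's 80 rounds of tail-slicing with a single element-wise pass binning
-- into 80 preallocated accumulators (objective: alternative, one pass over the data).

-- ===== PORT A =====
-- loop body of A's for-loop, as a named helper
def aStep (st : List Int × List Int) (i : Int) : List Int × List Int :=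
  if PySem.Int.mod i 4 == 0 then
    (st.1 ++ [(PySem.List.slice st.2 none (some 366)).sum],
     PySem.List.slice st.2 (some 366) none)
  else
    (st.1 ++ [(PySem.List.slice st.2 none (some 365)).sum],
     PySem.List.slice st.2 (some 365) none)

def to_annual_precipitation (series : List Int) : List Int :=
  ((PySem.List.pyRange 0 80 1).foldl aStep ([], series)).1

-- ===== PORT B =====
-- B's for-loop over the series: res[y] += x; rem -= 1; on rem == 0 advance the
-- year (break at 80) and reload rem from the year length.
def altGo : List Int → List Int → Nat → Nat → List Int
  | [], res, _, _ => res
  | x :: xs, res, y, rem =>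
    let res' := res.set y (res.getD y 0 + x)
    if rem - 1 == 0 then
      if y + 1 == 80 then res'
      else altGo xs res' (y + 1) (if (y + 1) % 4 == 0 then 366 else 365)
    else altGo xs res' y (rem - 1)

def to_annual_precipitation_alt (series : List Int) : List Int :=
  altGo series (List.replicate 80 0) 0 366

-- ===== PRECONDITION & SPEC =====
def Spec_to_annual_precipitation (series : List Int) (out : List Int) : Prop := out = to_annual_precipitation_alt series
instance (series : List Int) (out : List Int) : Decidable (Spec_to_annual_precipitation series out) := by unfold Spec_to_annual_precipitation; infer_instance

-- ===== CLAIM (what is proved, stated in full; the proofs are below) =====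
def Claim_equal_to_annual_precipitation : Prop := ∀ (series : List Int), Dom_to_annual_precipitation series → Spec_to_annual_precipitation series (to_annual_precipitation series)

-- ===== LEMMAS AND PROOFS =====

-- common reference: length of year y and the list of the 80-y year sums starting
-- mid-year y with rem elements still owed to it and partial sum s
def lenYear (y : Nat) : Nat := if y % 4 == 0 then 366 else 365

def spec2 : Nat → List Int → Nat → Nat → Int → List Int
  | 0, _, _, _, _ => []
  | n + 1, l, y, rem, s =>
      (s + (l.take rem).sum) :: spec2 n (l.drop rem) (y + 1) (lenYear (y + 1)) 0

theorem spec2_nil (n : Nat) : ∀ y rem, spec2 n [] y rem 0 = List.replicate n 0 := by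
  induction n with
  | zero => intro y rem; rfl
  | succ m ih => intro y rem; simp [spec2, ih, List.replicate_succ]

theorem getD_append_length (pre t : List Int) (a d : Int) :
    (pre ++ a :: t).getD pre.length d = a := by
  simp [List.getD_eq_getElem?_getD]

theorem set_append_length (pre t : List Int) (a b : Int) :
    (pre ++ a :: t).set pre.length b = pre ++ b :: t := by
  rw [List.set_append_right _ _ (le_refl _)]
  simp

theorem altGo_spec2 (l : List Int) : ∀ (pre : List Int) (s : Int) (n y rem : Nat),
    pre.length = y → y + n = 79 → 1 ≤ rem →
    altGo l (pre ++ s :: List.replicate n 0) y rem = pre ++ spec2 (n + 1) l y rem s := by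
  induction l with
  | nil =>
    intro pre s n y rem _ _ _
    simp [altGo, spec2, spec2_nil]
  | cons x xs ih =>
    intro pre s n y rem hlen hn hrem
    obtain ⟨r, rfl⟩ : ∃ r, rem = r + 1 := ⟨rem - 1, by omega⟩
    simp only [altGo]
    rw [← hlen, getD_append_length, set_append_length]
    by_cases hr : r = 0
    · subst hr
      simp only [Nat.add_sub_cancel, beq_self_eq_true, if_true]
      cases n with
      | zero =>
        have : pre.length + 1 = 80 := by omega
        simp [this, spec2, List.take_succ_cons]
      | succ m =>
        have h80 : (pre.length + 1 == 80) = false := by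
          simp; omega
        rw [h80]
        simp only [Bool.false_eq_true, if_false]
        have := ih (pre ++ [s + x]) 0 m (pre.length + 1)
          (if (pre.length + 1) % 4 == 0 then 366 else 365)
          (by simp) (by omega) (by split <;> omega)
        rw [show (List.replicate (m + 1) (0 : Int)) = 0 :: List.replicate m 0 from rfl,
            show pre ++ (s + x) :: 0 :: List.replicate m 0
               = (pre ++ [s + x]) ++ 0 :: List.replicate m 0 by simp] at *
        rw [this]
        simp only [spec2, List.take_succ_cons, List.sum_cons, List.take_zero,
          List.sum_nil, List.drop_succ_cons, List.drop_zero]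
        have hly : (if (pre.length + 1) % 4 == 0 then (366:Nat) else 365) = lenYear (pre.length + 1) := rfl
        rw [hly]
        simp [add_assoc]
    · have hb : (r + 1 - 1 == 0) = false := by simp; omega
      rw [hb]
      simp only [Bool.false_eq_true, if_false, Nat.add_sub_cancel]
      rw [ih pre (s + x) n pre.length r rfl (by omega) (by omega)]
      simp only [spec2, List.take_succ_cons, List.sum_cons, List.drop_succ_cons]
      ring_nf

theorem alt_eq_spec2 (series : List Int) :
    to_annual_precipitation_alt series = spec2 80 series 0 366 0 := by
  unfold to_annual_precipitation_alt
  have : (List.replicate 80 (0 : Int)) = [] ++ (0 : Int) :: List.replicate 79 0 := rfl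
  rw [this, altGo_spec2 series [] 0 79 0 366 rfl (by omega) (by omega)]
  simp

theorem a_fold_spec2 (n : Nat) : ∀ (a : Int) (res cur : List Int),
    0 ≤ a → a + n = 80 →
    ((PySem.List.pyRange a 80 1).foldl aStep (res, cur)).1
      = res ++ spec2 n cur a.toNat (lenYear a.toNat) 0 := by
  induction n with
  | zero =>
    intro a res cur ha hn
    rw [PySem.List.pyRange_one_eq_nil (by omega)]
    simp [spec2]
  | succ m ih =>
    intro a res cur ha hn
    rw [PySem.List.pyRange_one_cons (by omega)]
    simp only [List.foldl_cons]
    have hmod : PySem.Int.mod a 4 = ((a.toNat % 4 : Nat) : Int) := by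
      conv_lhs => rw [show a = ((a.toNat : Nat) : Int) by omega]
      exact PySem.Int.mod_natCast a.toNat 4
    have htn : (a + 1).toNat = a.toNat + 1 := by omega
    by_cases h4 : a.toNat % 4 = 0
    · have hstep : aStep (res, cur) a
          = (res ++ [(cur.take 366).sum], cur.drop 366) := by
        unfold aStep
        rw [hmod]
        have hc : ((((a.toNat % 4 : Nat) : Int)) == 0) = true := by simp [h4]
        rw [hc]
        simp only [if_true]
        rw [show (366 : Int) = ((366 : Nat) : Int) by norm_num]
        rw [PySem.List.slice_to_natCast, PySem.List.slice_from_natCast]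
      rw [hstep, ih (a + 1) _ _ (by omega) (by omega), htn]
      have hl : lenYear a.toNat = 366 := by simp [lenYear, h4]
      simp [spec2, hl]
    · have hstep : aStep (res, cur) a
          = (res ++ [(cur.take 365).sum], cur.drop 365) := by
        unfold aStep
        rw [hmod]
        have hc : ((((a.toNat % 4 : Nat) : Int)) == 0) = false := by simp; omega
        rw [hc]
        simp only [Bool.false_eq_true, if_false]
        rw [show (365 : Int) = ((365 : Nat) : Int) by norm_num]
        rw [PySem.List.slice_to_natCast, PySem.List.slice_from_natCast]
      rw [hstep, ih (a + 1) _ _ (by omega) (by omega), htn]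
      have hl : lenYear a.toNat = 365 := by simp [lenYear, h4]
      simp [spec2, hl]

theorem a_eq_spec2 (series : List Int) :
    to_annual_precipitation series = spec2 80 series 0 366 0 := by
  unfold to_annual_precipitation
  rw [a_fold_spec2 80 0 [] series (by omega) (by omega)]
  simp [lenYear]

-- ===== VERDICT (by name: the statement is the Claim_ definition above) =====
theorem to_annual_precipitation_spec : Claim_equal_to_annual_precipitation := by
  intro series _
  unfold Spec_to_annual_precipitation
  rw [a_eq_spec2, alt_eq_spec2]
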